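-- pv_equiv track=rewrite | github.com/naonaox/math.practice | bioinfoStronghold/revp.py | findRevPalindrom
-- ===== SOURCE A (Python) =====
-- def reverseComplement(oseq):
--     rdic={'A':'T','T':'A','C':'G','G':'C'}
--     rseq=''
--     for b in oseq.upper():
--         rseq=rdic[b]+rseq
--     return rseq
--
-- def isRevPalindrom(palseq):
--     if palseq==reverseComplement(palseq):
--         return True
--     return False
--
-- def findRevPalindrom(dnaseq,kmin,kmax):
--     palPos=[]
--     for i in range(len(dnaseq)-kmin+1):
--         for j in range(kmin,kmax+1):
--             if i+j<=len(dnaseq):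
--                 if isRevPalindrom(dnaseq[i:i+j]):
--                     palPos.append((i+1,j))
--     return palPos
-- ===== SOURCE B (Python) =====
-- def findRevPalindrom(dnaseq, kmin, kmax):
--     n = len(dnaseq)
--     # smallest useful candidate length: even and >= max(kmin, 2)
--     lo = kmin if kmin > 2 else 2
--     if lo % 2:
--         lo += 1
--     if lo > kmax or lo > n:
--         return []
--     comp = {'A': 'T', 'T': 'A', 'C': 'G', 'G': 'C'}
--
--     def pair(a, b):
--         return (dnaseq[a] == comp.get(dnaseq[b].upper())
--                 and dnaseq[b] == comp.get(dnaseq[a].upper()))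
--
--     # rad[c] = max r such that the r pairs straddling center c all complement each other
--     rad = []
--     for c in range(n + 1):
--         r = 0
--         while r < c and c + r < n and pair(c - 1 - r, c + r):
--             r += 1
--         rad.append(r)
--
--     res = []
--     for i in range(n - lo + 1):
--         for j in range(lo, kmax + 1, 2):
--             if i + j <= n and j // 2 <= rad[i + j // 2]:
--                 res.append((i + 1, j))
--     return res
-- ===== Notes on version B (the rewrite author's own statement) =====
-- stated objective: faster
-- what changed: Instead of building the reverse complement of every window and comparing strings, B computes the smallest useful even candidate length (returning [] at once when none fits), precomputes for each of the n+1 centers the maximal complement-pair radius (expand-around-center), and then tests each candidate (start, even length) in O(1) against that table.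
-- outside the precondition, e.g. on findRevPalindrom('AT', 0, 2): A returns [(1, 0), (1, 2), (2, 0), (3, 0)], B returns [(1, 2)]; on findRevPalindrom('A', -1, -1): A returns [(1, -1), (2, -1), (3, -1)], B returns []
import Mathlib
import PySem

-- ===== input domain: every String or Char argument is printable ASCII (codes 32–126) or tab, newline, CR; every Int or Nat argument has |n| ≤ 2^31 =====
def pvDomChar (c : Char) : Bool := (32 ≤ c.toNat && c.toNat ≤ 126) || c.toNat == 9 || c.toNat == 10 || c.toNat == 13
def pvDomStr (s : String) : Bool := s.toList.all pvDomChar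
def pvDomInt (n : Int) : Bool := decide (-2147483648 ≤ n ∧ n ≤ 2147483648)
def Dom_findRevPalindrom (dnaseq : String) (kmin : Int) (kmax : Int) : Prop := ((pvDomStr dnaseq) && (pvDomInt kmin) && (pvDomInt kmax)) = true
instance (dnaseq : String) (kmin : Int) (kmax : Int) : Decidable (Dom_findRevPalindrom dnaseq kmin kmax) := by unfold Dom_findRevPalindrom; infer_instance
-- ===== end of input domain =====

-- B replaces A's per-window reverse-complement string construction by a precomputed
-- per-center complement-radius table, making each candidate test O(1) (objective: faster).

-- ===== PORT A =====
-- rdic = {'A':'T','T':'A','C':'G','G':'C'}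
def pvRdic : PySem.Dict Char Char :=
  PySem.Dict.ofList [('A', 'T'), ('T', 'A'), ('C', 'G'), ('G', 'C')]

-- rseq is represented by its list of characters (strings are proved about on the list side);
-- none = the KeyError Python raises on a base outside ACGT (excluded by Pre_).
def reverseComplement (oseq : String) : Option (List Char) :=
  (PySem.Chars.upper oseq.toList).foldl
    (fun acc b => acc.bind (fun rseq => (pvRdic.get? b).map (fun x => x :: rseq)))
    (some [])

def isRevPalindrom (palseq : String) : Bool :=
  match reverseComplement palseq with
  | some rseq => palseq.toList == rseq
  | none => false   -- Python raises KeyError here; Pre_ excludes these inputs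

def findRevPalindrom (dnaseq : String) (kmin : Int) (kmax : Int) : List (Int × Int) :=
  let n : Int := (dnaseq.toList.length : Int)
  (PySem.List.pyRange 0 (n - kmin + 1) 1).foldl (fun acc i =>
    (PySem.List.pyRange kmin (kmax + 1) 1).foldl (fun acc2 j =>
      if i + j ≤ n then
        if isRevPalindrom (PySem.Str.slice dnaseq (some i) (some (i + j))) then
          acc2 ++ [(i + 1, j)]
        else acc2
      else acc2) acc) []

-- ===== PORT B =====
-- comp = {'A':'T','T':'A','C':'G','G':'C'}
def pvComp : PySem.Dict Char Char :=
  PySem.Dict.ofList [('A', 'T'), ('T', 'A'), ('C', 'G'), ('G', 'C')]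

-- pair(a,b): dnaseq[a] == comp.get(dnaseq[b].upper()) and dnaseq[b] == comp.get(dnaseq[a].upper())
-- (indices are in range whenever called; comp.get returning None compares unequal to any char)
def pvPair (l : List Char) (a b : Nat) : Bool :=
  (some (l.getD a ' ') == pvComp.get? (PySem.Chars.upperChar (l.getD b ' '))) &&
  (some (l.getD b ' ') == pvComp.get? (PySem.Chars.upperChar (l.getD a ' ')))

-- the while-loop expanding the complement radius around center c, starting at radius r
def pvExpand (l : List Char) (c : Nat) (r : Nat) : Nat :=
  if h : r < c ∧ c + r < l.length ∧ pvPair l (c - 1 - r) (c + r) = true then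
    pvExpand l c (r + 1)
  else r
termination_by l.length - r
decreasing_by omega

-- rad = [expand(c) for c in range(n+1)]
def pvRad (l : List Char) : List Int :=
  (List.range (l.length + 1)).map (fun c => (pvExpand l c 0 : Int))

def findRevPalindrom_alt (dnaseq : String) (kmin : Int) (kmax : Int) : List (Int × Int) :=
  let l := dnaseq.toList
  let n : Int := (l.length : Int)
  -- lo = smallest useful candidate length: even and >= max(kmin, 2)
  let lo1 : Int := if 2 < kmin then kmin else 2
  let lo : Int := if PySem.Int.mod lo1 2 ≠ 0 then lo1 + 1 else lo1
  if lo > kmax ∨ lo > n then []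
  else
    let rad := pvRad l
    (PySem.List.pyRange 0 (n - lo + 1) 1).foldl (fun acc i =>
      (PySem.List.pyRange lo (kmax + 1) 2).foldl (fun acc2 j =>
        if i + j ≤ n ∧
            PySem.Int.floordiv j 2 ≤ PySem.List.pyGetD rad (i + PySem.Int.floordiv j 2) 0 then
          acc2 ++ [(i + 1, j)]
        else acc2) acc) []

-- ===== PRECONDITION & SPEC =====
-- Pre_ excludes (a) inputs whose scanned windows contain a base outside ACGT/acgt, where A raises
-- KeyError, and (b) kmin < 1 with kmax >= kmin, where A counts every empty or negative-length slice
-- as a palindrome -- an artefact of Python slicing -- while B skips those lengths or raises IndexError.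
def Pre_findRevPalindrom (dnaseq : String) (kmin : Int) (kmax : Int) : Prop :=
  kmax < kmin ∨
    (1 ≤ kmin ∧
      ((dnaseq.toList.all fun c =>
          decide (c ∈ (['A', 'C', 'G', 'T', 'a', 'c', 'g', 't'] : List Char))) = true ∨
        (dnaseq.toList.length : Int) < kmin))
instance (dnaseq : String) (kmin : Int) (kmax : Int) : Decidable (Pre_findRevPalindrom dnaseq kmin kmax) := by
  unfold Pre_findRevPalindrom; infer_instance

def pvWitness_findRevPalindrom : String × Int × Int := ("ACGT", 2, 4)

def Spec_findRevPalindrom (dnaseq : String) (kmin : Int) (kmax : Int) (out : List (Int × Int)) : Prop := out = findRevPalindrom_alt dnaseq kmin kmax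
instance (dnaseq : String) (kmin : Int) (kmax : Int) (out : List (Int × Int)) : Decidable (Spec_findRevPalindrom dnaseq kmin kmax out) := by unfold Spec_findRevPalindrom; infer_instance

-- ===== CLAIM (what is proved, stated in full; the proofs are below) =====
def Claim_equal_findRevPalindrom : Prop := ∀ (dnaseq : String) (kmin : Int) (kmax : Int), Dom_findRevPalindrom dnaseq kmin kmax → Pre_findRevPalindrom dnaseq kmin kmax → Spec_findRevPalindrom dnaseq kmin kmax (findRevPalindrom dnaseq kmin kmax)

-- ===== LEMMAS AND PROOFS =====

-- the eight admissible bases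
def pvGood (c : Char) : Prop := c ∈ (['A', 'C', 'G', 'T', 'a', 'c', 'g', 't'] : List Char)

-- total complement-of-uppercase map (agrees with the dict lookup on good bases)
def pvG (c : Char) : Char := ((pvRdic.get? (PySem.Chars.upperChar c)).getD c)

theorem pvGood_lookup {c : Char} (hc : pvGood c) :
    pvRdic.get? (PySem.Chars.upperChar c) = some (pvG c) := by
  unfold pvGood at hc; simp only [List.mem_cons, List.not_mem_nil, or_false] at hc
  rcases hc with rfl | rfl | rfl | rfl | rfl | rfl | rfl | rfl <;> decide

theorem pvG_ne {c : Char} (hc : pvGood c) : pvG c ≠ c := by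
  unfold pvGood at hc; simp only [List.mem_cons, List.not_mem_nil, or_false] at hc
  rcases hc with rfl | rfl | rfl | rfl | rfl | rfl | rfl | rfl <;> decide

theorem pvRevcomp_fold (w : List Char) : (∀ c ∈ w, pvGood c) → ∀ (acc : List Char),
    (PySem.Chars.upper w).foldl
      (fun acc b => acc.bind (fun rseq => (pvRdic.get? b).map (fun x => x :: rseq)))
      (some acc) = some ((w.map pvG).reverse ++ acc) := by
  induction w with
  | nil => intro _ acc; simp [PySem.Chars.upper]
  | cons c w ih =>
    intro hw acc
    have hc : pvGood c := hw c (by simp)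
    have hstep : PySem.Chars.upper (c :: w) = PySem.Chars.upperChar c :: PySem.Chars.upper w := by
      simp [PySem.Chars.upper]
    rw [hstep, List.foldl_cons]
    have hlook := pvGood_lookup hc
    simp only [Option.bind_some, hlook, Option.map_some]
    rw [ih (fun x hx => hw x (by simp [hx])) (pvG c :: acc)]
    simp

theorem pvIsRevPal_iff (s : String) (h : ∀ c ∈ s.toList, pvGood c) :
    isRevPalindrom s = true ↔ s.toList = (s.toList.map pvG).reverse := by
  unfold isRevPalindrom reverseComplement
  rw [pvRevcomp_fold s.toList h []]
  simp

-- pointwise characterisation of the reverse-complement palindrome property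
theorem pvPointwise (w : List Char) :
    w = (w.map pvG).reverse ↔
      ∀ t, t < w.length → w.getD t ' ' = pvG (w.getD (w.length - 1 - t) ' ') := by
  constructor
  · intro h t ht
    conv_lhs => rw [h]
    rw [List.getD_eq_getElem _ _ (by simpa using ht),
        List.getD_eq_getElem _ _ (by omega),
        List.getElem_reverse, List.getElem_map]
    simp
  · intro h
    apply List.ext_getElem (by simp)
    intro i h1 h2
    rw [List.getElem_reverse, List.getElem_map]
    have := h i h1
    rw [List.getD_eq_getElem _ _ h1, List.getD_eq_getElem _ _ (by omega)] at this
    simp only [List.length_map]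
    exact this

def pvCond (l : List Char) (c t : Nat) : Prop :=
  t < c ∧ c + t < l.length ∧ pvPair l (c - 1 - t) (c + t) = true

theorem pvExpand_cond (l : List Char) (c : Nat) :
    ∀ r t, r ≤ t → t < pvExpand l c r → pvCond l c t := by
  have key : ∀ d r t, l.length - r ≤ d → r ≤ t → t < pvExpand l c r → pvCond l c t := by
    intro d
    induction d with
    | zero =>
      intro r t hd hrt ht
      rw [pvExpand, dif_neg (by rintro ⟨-, h2, -⟩; omega)] at ht
      omega
    | succ d ih =>
      intro r t hd hrt ht
      by_cases hcond : (r < c ∧ c + r < l.length ∧ pvPair l (c - 1 - r) (c + r) = true)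
      · rw [pvExpand, dif_pos hcond] at ht
        rcases Nat.eq_or_lt_of_le hrt with rfl | hlt
        · exact ⟨hcond.1, hcond.2.1, hcond.2.2⟩
        · exact ih (r + 1) t (by omega) hlt ht
      · rw [pvExpand, dif_neg hcond] at ht
        omega
  exact fun r t => key l.length r t (by omega)

theorem pvSelf_le_expand (l : List Char) (c : Nat) : ∀ r, r ≤ pvExpand l c r := by
  have key : ∀ d r, l.length - r ≤ d → r ≤ pvExpand l c r := by
    intro d
    induction d with
    | zero =>
      intro r hd
      rw [pvExpand, dif_neg (by rintro ⟨-, h2, -⟩; omega)]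
    | succ d ih =>
      intro r hd
      by_cases hcond : (r < c ∧ c + r < l.length ∧ pvPair l (c - 1 - r) (c + r) = true)
      · rw [pvExpand, dif_pos hcond]
        have := ih (r + 1) (by omega)
        omega
      · rw [pvExpand, dif_neg hcond]
  exact fun r => key l.length r (by omega)

theorem pvLe_expand (l : List Char) (c : Nat) :
    ∀ d r, (∀ t, r ≤ t → t < r + d → pvCond l c t) → r + d ≤ pvExpand l c r := by
  intro d
  induction d with
  | zero => intro r _; simpa using pvSelf_le_expand l c r
  | succ d ih =>
    intro r h
    have hcr : pvCond l c r := h r le_rfl (by omega)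
    rw [pvExpand, dif_pos ⟨hcr.1, hcr.2.1, hcr.2.2⟩]
    have := ih (r + 1) (fun t h1 h2 => h t (by omega) (by omega))
    omega

theorem pvExpand_le_iff (l : List Char) (c k : Nat) :
    k ≤ pvExpand l c 0 ↔ ∀ t, t < k → pvCond l c t := by
  constructor
  · intro h t ht; exact pvExpand_cond l c 0 t (Nat.zero_le t) (lt_of_lt_of_le ht h)
  · intro h; simpa using pvLe_expand l c k 0 (fun t _ ht2 => h t (by omega))

theorem pvPair_iff (l : List Char) (x y : Nat) (hx : x < l.length) (hy : y < l.length)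
    (hgx : pvGood l[x]) (hgy : pvGood l[y]) :
    pvPair l x y = true ↔ (l[x] = pvG l[y] ∧ l[y] = pvG l[x]) := by
  unfold pvPair
  have hdx : l.getD x ' ' = l[x] := by simp [List.getD_eq_getElem?_getD, hx]
  have hdy : l.getD y ' ' = l[y] := by simp [List.getD_eq_getElem?_getD, hy]
  rw [hdx, hdy, show pvComp = pvRdic from rfl, pvGood_lookup hgx, pvGood_lookup hgy]
  simp [Bool.and_eq_true, beq_iff_eq]

-- the crux: A's per-window palindrome test equals B's radius-table test
theorem pvPal_iff_rad (s : String) (a b : Nat) (hab : a + b ≤ s.toList.length)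
    (hg : (∀ c ∈ s.toList, pvGood c) ∨ b = 0) :
    (isRevPalindrom (PySem.Str.slice s (some (a : Int)) (some ((a : Int) + (b : Int)))) = true)
      ↔ (b % 2 = 0 ∧ b / 2 ≤ pvExpand s.toList (a + b / 2) 0) := by
  have hslice : (PySem.Str.slice s (some (a : Int)) (some ((a : Int) + (b : Int)))).toList
      = (s.toList.drop a).take b := by
    simp only [PySem.Str.toList_slice, PySem.Chars.slice_eq_listSlice, PySem.List.slice_natCast_add]
  have hwlen : ((s.toList.drop a).take b).length = b := by
    rw [List.length_take, List.length_drop]; omega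
  rcases Nat.eq_zero_or_pos b with rfl | hb
  · constructor
    · intro _; exact ⟨rfl, Nat.zero_le _⟩
    · intro _
      unfold isRevPalindrom reverseComplement
      rw [pvRevcomp_fold _ (by rw [hslice]; simp)]
      simp [PySem.List.slice_natCast]
  · have hgood : ∀ c ∈ s.toList, pvGood c := by
      rcases hg with h | h
      · exact h
      · omega
    have hgw : ∀ c ∈ (PySem.Str.slice s (some (a : Int)) (some ((a : Int) + (b : Int)))).toList,
        pvGood c := by
      rw [hslice]
      intro c hc
      exact hgood c (List.mem_of_mem_drop (List.mem_of_mem_take hc))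
    rw [pvIsRevPal_iff _ hgw, hslice, pvPointwise, hwlen]
    have hwget : ∀ t, t < b →
        ((s.toList.drop a).take b).getD t ' ' = s.toList.getD (a + t) ' ' := by
      intro t ht
      rw [List.getD_eq_getElem _ _ (by omega), List.getElem_take, List.getElem_drop,
          List.getD_eq_getElem _ _ (by omega)]
    have key : (∀ t, t < b → ((s.toList.drop a).take b).getD t ' ' =
          pvG (((s.toList.drop a).take b).getD (b - 1 - t) ' '))
        ↔ (∀ t, t < b → s.toList.getD (a + t) ' ' = pvG (s.toList.getD (a + (b - 1 - t)) ' ')) := by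
      constructor
      · intro h t ht
        have := h t ht
        rw [hwget t ht, hwget (b - 1 - t) (by omega)] at this
        exact this
      · intro h t ht
        rw [hwget t ht, hwget (b - 1 - t) (by omega)]
        exact h t ht
    rw [key, pvExpand_le_iff]
    have hcnd : ∀ t, t < b / 2 → (pvCond s.toList (a + b / 2) t ↔
        (s.toList.getD (a + b / 2 - 1 - t) ' ' = pvG (s.toList.getD (a + b / 2 + t) ' ') ∧
         s.toList.getD (a + b / 2 + t) ' ' = pvG (s.toList.getD (a + b / 2 - 1 - t) ' '))) := by
      intro t ht
      have hx : a + b / 2 - 1 - t < s.toList.length := by omega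
      have hy : a + b / 2 + t < s.toList.length := by omega
      unfold pvCond
      rw [pvPair_iff _ _ _ hx hy (hgood _ (List.getElem_mem _)) (hgood _ (List.getElem_mem _))]
      rw [List.getD_eq_getElem _ _ hx, List.getD_eq_getElem _ _ hy]
      constructor
      · exact fun h => h.2.2
      · exact fun h => ⟨by omega, by omega, h⟩
    constructor
    · intro h
      have heven : b % 2 = 0 := by
        by_contra hodd
        have hmid := h (b / 2) (by omega)
        rw [show a + (b - 1 - b / 2) = a + b / 2 from by omega] at hmid
        have hy : a + b / 2 < s.toList.length := by omega
        rw [List.getD_eq_getElem _ _ hy] at hmid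
        exact pvG_ne (hgood _ (List.getElem_mem _)) hmid.symm
      refine ⟨heven, fun t ht => (hcnd t ht).mpr ?_⟩
      constructor
      · have h1 := h (b / 2 - 1 - t) (by omega)
        rw [show a + (b / 2 - 1 - t) = a + b / 2 - 1 - t from by omega,
            show a + (b - 1 - (b / 2 - 1 - t)) = a + b / 2 + t from by omega] at h1
        exact h1
      · have h2 := h (b / 2 + t) (by omega)
        rw [show a + (b / 2 + t) = a + b / 2 + t from by omega,
            show a + (b - 1 - (b / 2 + t)) = a + b / 2 - 1 - t from by omega] at h2
        exact h2
    · rintro ⟨heven, h⟩ t ht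
      by_cases hth : t < b / 2
      · have hp := ((hcnd (b / 2 - 1 - t) (by omega)).mp (h _ (by omega))).1
        rw [show a + b / 2 - 1 - (b / 2 - 1 - t) = a + t from by omega,
            show a + b / 2 + (b / 2 - 1 - t) = a + (b - 1 - t) from by omega] at hp
        exact hp
      · have hp := ((hcnd (t - b / 2) (by omega)).mp (h _ (by omega))).2
        rw [show a + b / 2 + (t - b / 2) = a + t from by omega,
            show a + b / 2 - 1 - (t - b / 2) = a + (b - 1 - t) from by omega] at hp
        exact hp

theorem pvFoldlCellsId {γ : Type} (R : List Int) (f : γ → Int → γ)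
    (h : ∀ (acc : γ), ∀ j ∈ R, f acc j = acc) (acc : γ) : R.foldl f acc = acc := by
  rw [PySem.List.foldl_congr_mem R f (fun acc _ => acc) acc h]
  simp

theorem pvRange2_nil (a b : Int) (h : b ≤ a) : PySem.List.pyRange a b 2 = [] := by
  rw [PySem.List.pyRange_of_pos a b (by omega), if_neg (by omega)]
  simp

theorem pvRange2_cons (a b : Int) (h : a < b) :
    PySem.List.pyRange a b 2 = a :: PySem.List.pyRange (a + 2) b 2 := by
  rw [PySem.List.pyRange_of_pos a b (by omega), PySem.List.pyRange_of_pos (a + 2) b (by omega),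
      if_pos h]
  have hm : ((b - a + 2 - 1) / 2).toNat = (if a + 2 < b then ((b - (a + 2) + 2 - 1) / 2).toNat else 0) + 1 := by
    split_ifs <;> omega
  rw [hm, List.range_succ_eq_map, List.map_cons, List.map_map]
  refine congrArg₂ _ (by omega) (List.map_congr_left fun k _ => ?_)
  simp only [Function.comp_apply]
  push_cast
  ring

theorem pvFoldStep2 {γ : Type} (f g : γ → Int → γ) :
    ∀ (d : Nat) (lo hi : Int) (acc : γ), (hi - lo).toNat ≤ d → lo % 2 = 0 →
    (∀ (acc2 : γ) (j : Int), lo ≤ j → j < hi → j % 2 = 0 → f acc2 j = g acc2 j) →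
    (∀ (acc2 : γ) (j : Int), lo ≤ j → j < hi → j % 2 ≠ 0 → f acc2 j = acc2) →
    List.foldl f acc (PySem.List.pyRange lo hi 1) = List.foldl g acc (PySem.List.pyRange lo hi 2) := by
  intro d
  induction d with
  | zero =>
    intro lo hi acc hd _ _ _
    rw [PySem.List.pyRange_one_eq_nil (by omega), pvRange2_nil lo hi (by omega)]
    rfl
  | succ d ih =>
    intro lo hi acc hd heven hfg hodd
    by_cases hlt : lo < hi
    · rw [PySem.List.pyRange_one_cons hlt, pvRange2_cons lo hi hlt, List.foldl_cons,
          List.foldl_cons, hfg acc lo le_rfl hlt heven]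
      by_cases hlt2 : lo + 1 < hi
      · rw [PySem.List.pyRange_one_cons hlt2, List.foldl_cons,
            hodd (g acc lo) (lo + 1) (by omega) hlt2 (by omega)]
        rw [show lo + 1 + 1 = lo + 2 from by ring]
        exact ih (lo + 2) hi (g acc lo) (by omega) (by omega)
          (fun a j h1 h2 h3 => hfg a j (by omega) h2 h3)
          (fun a j h1 h2 h3 => hodd a j (by omega) h2 h3)
      · rw [PySem.List.pyRange_one_eq_nil (by omega), pvRange2_nil (lo + 2) hi (by omega)]
        rfl
    · rw [PySem.List.pyRange_one_eq_nil (by omega), pvRange2_nil lo hi (by omega)]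
      rfl

-- A's per-candidate test, fully on the Int side: palindrome ⟺ even length and radius-table hit
theorem pvCell_iff (s : String) (hgood : ∀ c ∈ s.toList, pvGood c) (i j : Int)
    (h0i : 0 ≤ i) (h1j : 1 ≤ j) (hij : i + j ≤ (s.toList.length : Int)) :
    (isRevPalindrom (PySem.Str.slice s (some i) (some (i + j))) = true) ↔
      (j % 2 = 0 ∧
        PySem.Int.floordiv j 2 ≤ PySem.List.pyGetD (pvRad s.toList) (i + PySem.Int.floordiv j 2) 0) := by
  obtain ⟨a, rfl⟩ : ∃ a : Nat, i = (a : Int) := ⟨i.toNat, (Int.toNat_of_nonneg h0i).symm⟩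
  obtain ⟨b, rfl⟩ : ∃ b : Nat, j = (b : Int) := ⟨j.toNat, (Int.toNat_of_nonneg (by omega)).symm⟩
  have hab : a + b ≤ s.toList.length := by exact_mod_cast hij
  have e2 : PySem.Int.floordiv (b : Int) 2 = ((b / 2 : Nat) : Int) := by
    exact_mod_cast PySem.Int.floordiv_natCast b 2
  have e4 : PySem.List.pyGetD (pvRad s.toList) (((a + b / 2 : Nat) : Int)) 0 =
      ((pvExpand s.toList (a + b / 2) 0 : Nat) : Int) := by
    rw [PySem.List.pyGetD_natCast]
    unfold pvRad
    rw [PySem.List.getD_map_range _ _ _ _ (by omega)]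
  rw [pvPal_iff_rad s a b hab (Or.inl hgood), e2,
      show (a : Int) + ((b / 2 : Nat) : Int) = ((a + b / 2 : Nat) : Int) by push_cast; ring, e4]
  constructor
  · rintro ⟨h1, h2⟩
    exact ⟨by omega, by exact_mod_cast h2⟩
  · rintro ⟨h1, h2⟩
    exact ⟨by omega, by exact_mod_cast h2⟩

-- A returns nothing when no candidate window passes its test
theorem pvA_eq_nil (s : String) (kmin kmax : Int)
    (h : ∀ (i j : Int), 0 ≤ i → kmin ≤ j → j < kmax + 1 → i + j ≤ (s.toList.length : Int) →
      ¬ isRevPalindrom (PySem.Str.slice s (some i) (some (i + j))) = true) :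
    findRevPalindrom s kmin kmax = [] := by
  unfold findRevPalindrom
  dsimp only
  apply pvFoldlCellsId
  intro acc i hi
  apply pvFoldlCellsId
  intro acc2 j hj
  have h1 := PySem.List.mem_pyRange_one.mp hi
  have h2 := PySem.List.mem_pyRange_one.mp hj
  by_cases hin : i + j ≤ (s.toList.length : Int)
  · rw [if_pos hin, if_neg (h i j h1.1 h2.1 h2.2 hin)]
  · rw [if_neg hin]

-- ===== VERDICT (by name: the statement is the Claim_ definition above) =====
theorem findRevPalindrom_spec : Claim_equal_findRevPalindrom := by
  intro s kmin kmax hdom hpre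
  unfold Spec_findRevPalindrom findRevPalindrom_alt
  dsimp only
  set lo1 : Int := if 2 < kmin then kmin else 2 with hlo1
  set lo : Int := if PySem.Int.mod lo1 2 ≠ 0 then lo1 + 1 else lo1 with hlo
  have hm1 : PySem.Int.mod lo1 2 = lo1 % 2 := PySem.Int.mod_eq_emod_of_pos (by omega)
  have hl1 : lo1 = kmin ∨ lo1 = 2 := by rw [hlo1]; split_ifs <;> simp
  have hl1k : kmin ≤ lo1 ∧ 2 ≤ lo1 := by rw [hlo1]; split_ifs <;> omega
  have heven : lo % 2 = 0 := by rw [hlo, hm1]; split_ifs <;> omega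
  have hlo_ge : kmin ≤ lo ∧ 2 ≤ lo := by rw [hlo]; split_ifs <;> omega
  have hlo_min : ∀ j : Int, kmin ≤ j → 2 ≤ j → j % 2 = 0 → lo ≤ j := by
    intro j hj1 hj2 hj3
    rw [hlo, hm1]
    rcases hl1 with h | h <;> rw [h] <;> split_ifs <;> omega
  have hgood_of : ((s.toList.all fun c =>
        decide (c ∈ (['A', 'C', 'G', 'T', 'a', 'c', 'g', 't'] : List Char))) = true) →
      ∀ c ∈ s.toList, pvGood c := by
    intro h c hc
    have := List.all_eq_true.mp h c hc
    unfold pvGood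
    simpa using this
  by_cases hdeg : lo > kmax ∨ lo > (s.toList.length : Int)
  · rw [if_pos hdeg]
    apply pvA_eq_nil
    intro i j h0i hj1 hj2 hij hp
    rcases hpre with hlt | ⟨hk1, hgn⟩
    · omega
    · rcases hgn with hgd | hnk
      · have hfacts := (pvCell_iff s (hgood_of hgd) i j h0i (by omega) hij).mp hp
        have := hlo_min j (by omega) (by omega) hfacts.1
        omega
      · omega
  · rw [if_neg hdeg]
    have hdeg1 : lo ≤ kmax := by by_contra h; exact hdeg (Or.inl (by omega))
    have hdeg2 : lo ≤ (s.toList.length : Int) := by by_contra h; exact hdeg (Or.inr (by omega))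
    have hk1 : 1 ≤ kmin := by
      rcases hpre with hlt | ⟨hk1, _⟩
      · omega
      · exact hk1
    have hgd : ∀ c ∈ s.toList, pvGood c := by
      rcases hpre with hlt | ⟨_, hgn⟩
      · omega
      · rcases hgn with hgd | hnk
        · exact hgood_of hgd
        · omega
    unfold findRevPalindrom
    dsimp only
    rw [PySem.List.pyRange_one_append 0 ((s.toList.length : Int) - lo + 1)
          ((s.toList.length : Int) - kmin + 1) (by omega) (by omega), List.foldl_append]
    rw [pvFoldlCellsId _ _ ?htail]
    case htail =>
      intro acc i hi
      have hir := PySem.List.mem_pyRange_one.mp hi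
      apply pvFoldlCellsId
      intro acc2 j hj
      have hjr := PySem.List.mem_pyRange_one.mp hj
      by_cases hin : i + j ≤ (s.toList.length : Int)
      · refine if_pos hin ▸ if_neg (fun hp => ?_)
        have hfacts := (pvCell_iff s hgd i j (by omega) (by omega) hin).mp hp
        have := hlo_min j (by omega) (by omega) hfacts.1
        omega
      · rw [if_neg hin]
    apply PySem.List.foldl_congr_mem
    intro acc i hi
    have hir := PySem.List.mem_pyRange_one.mp hi
    rw [PySem.List.pyRange_one_append kmin lo (kmax + 1) (by omega) (by omega), List.foldl_append]
    have hh := pvFoldlCellsId (PySem.List.pyRange kmin lo)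
      (fun acc2 j =>
        if i + j ≤ (s.toList.length : Int) then
          if isRevPalindrom (PySem.Str.slice s (some i) (some (i + j))) = true then
            acc2 ++ [(i + 1, j)]
          else acc2
        else acc2) ?hhead acc
    rw [hh]
    case hhead =>
      intro acc2 j hj
      dsimp only
      have hjr := PySem.List.mem_pyRange_one.mp hj
      by_cases hin : i + j ≤ (s.toList.length : Int)
      · refine if_pos hin ▸ if_neg (fun hp => ?_)
        have hfacts := (pvCell_iff s hgd i j (by omega) (by omega) hin).mp hp
        have := hlo_min j (by omega) (by omega) hfacts.1
        omega
      · rw [if_neg hin]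
    apply pvFoldStep2 _ _ ((kmax + 1 - lo).toNat) lo (kmax + 1) acc le_rfl heven
    · intro acc2 j hj1 hj2 hjev
      by_cases hin : i + j ≤ (s.toList.length : Int)
      · rw [if_pos hin]
        refine if_congr ?_ rfl rfl
        rw [pvCell_iff s hgd i j (by omega) (by omega) hin]
        constructor
        · rintro ⟨-, h2⟩
          exact ⟨hin, h2⟩
        · rintro ⟨-, h2⟩
          exact ⟨hjev, h2⟩
      · rw [if_neg hin, if_neg (fun hh => hin hh.1)]
    · intro acc2 j hj1 hj2 hjodd
      by_cases hin : i + j ≤ (s.toList.length : Int)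
      · refine if_pos hin ▸ if_neg (fun hp => ?_)
        exact hjodd ((pvCell_iff s hgd i j (by omega) (by omega) hin).mp hp).1
      · rw [if_neg hin]
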